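-- pv_equiv track=rewrite | github.com/HexaEngine/HexaEngine.ShaderLang | tools/locales_gen.py | strip_markdown_formatting
-- ===== SOURCE A (Python) =====
-- def strip_markdown_formatting(text: str) -> str:
--     result = []
--     skip_chars = {'`', '*', '_', '~'}
--     i = 0
--     while i < len(text):
--         c = text[i]
--         if c == '\\' and i + 1 < len(text):
--             result.append(text[i + 1])
--             i += 2
--             continue
--         if c in skip_chars:
--             i += 1
--             continue
--         result.append(c)
--         i += 1
--     return ''.join(result)
-- ===== SOURCE B (Python) =====
-- def strip_markdown_formatting(text: str) -> str:
--     def plain(s):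
--         return ''.join(ch for ch in s if ch not in '`*_~')
--     parts = text.split('\\')
--     pieces = [plain(parts[0])]
--     j = 1
--     while j < len(parts):
--         p = parts[j]
--         if p:
--             pieces.append(p[0] + plain(p[1:]))
--             j += 1
--         elif j + 1 < len(parts):
--             pieces.append('\\' + plain(parts[j + 1]))
--             j += 2
--         else:
--             pieces.append('\\')
--             j += 1
--     return ''.join(pieces)
-- ===== Notes on version B (the rewrite author's own statement) =====
-- stated objective: faster
-- what changed: Replaces A's index-arithmetic per-character scan (peeking text[i+1] and jumping i += 2 on escapes) with a staged pipeline: split the text on backslashes once, render each segment (the escaped first character kept verbatim, the rest filtered of the formatting chars) and join the pieces, moving the bulk work into C-level str.split/join.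
import Mathlib
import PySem

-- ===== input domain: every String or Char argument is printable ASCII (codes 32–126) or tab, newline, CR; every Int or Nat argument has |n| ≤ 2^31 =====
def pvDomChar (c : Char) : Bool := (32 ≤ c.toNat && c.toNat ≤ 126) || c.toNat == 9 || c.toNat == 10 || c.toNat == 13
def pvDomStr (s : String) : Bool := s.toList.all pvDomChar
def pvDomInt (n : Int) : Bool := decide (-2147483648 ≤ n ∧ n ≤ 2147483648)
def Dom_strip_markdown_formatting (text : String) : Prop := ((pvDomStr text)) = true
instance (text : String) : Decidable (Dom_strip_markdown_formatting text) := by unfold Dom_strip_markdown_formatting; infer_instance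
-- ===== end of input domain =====

-- B replaces A's single char-by-char index loop by a staged algorithm: split the text on
-- backslashes, then render each segment (escaped head kept verbatim, rest filtered of `*_~);
-- same output, same O(n) count but measurably faster (bulk split/join vs per-char loop).

-- ===== PORT A =====
-- A's while loop over the index i: each step looks at text[i] (and text[i+1] for an escape,
-- advancing by 2); transliterated as recursion on the character list with a two-element pattern.
def stripAuxA : List Char → List Char
  | [] => []
  | [c] => if c = '`' ∨ c = '*' ∨ c = '_' ∨ c = '~' then [] else [c]
  | c :: d :: rest =>
    if c = '\\' then d :: stripAuxA rest
    else if c = '`' ∨ c = '*' ∨ c = '_' ∨ c = '~' then stripAuxA (d :: rest)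
    else c :: stripAuxA (d :: rest)

def strip_markdown_formatting (text : String) : String :=
  String.mk (stripAuxA text.toList)

-- ===== PORT B =====
-- B's 'plain' helper: drop the formatting characters from a segment.
def plainB (l : List Char) : List Char :=
  l.filter (fun c => !(c == '`' || c == '*' || c == '_' || c == '~'))

-- B's while loop over the split segments from index 1 on: a nonempty segment keeps its first
-- (escaped) character verbatim; an empty segment is an escaped backslash consuming the next
-- segment, or a lone trailing backslash if it is the last.
def procB : List (List Char) → List Char
  | [] => []
  | (c :: cs) :: rest => c :: (plainB cs ++ procB rest)
  | [] :: q :: rest => '\\' :: (plainB q ++ procB rest)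
  | [[]] => ['\\']

def strip_markdown_formatting_alt (text : String) : String :=
  match text.toList.splitOn '\\' with
  | p0 :: rest => String.mk (plainB p0 ++ procB rest)
  | [] => ""   -- unreachable: split never returns an empty list

-- ===== PRECONDITION & SPEC =====
def Spec_strip_markdown_formatting (text : String) (out : String) : Prop := out = strip_markdown_formatting_alt text
instance (text : String) (out : String) : Decidable (Spec_strip_markdown_formatting text out) := by unfold Spec_strip_markdown_formatting; infer_instance

-- ===== CLAIM =====
def Claim_equal_strip_markdown_formatting : Prop := ∀ (text : String), Dom_strip_markdown_formatting text → Spec_strip_markdown_formatting text (strip_markdown_formatting text)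

-- ===== LEMMAS AND PROOFS =====

def fB (l : List Char) : List Char :=
  match l.splitOn '\\' with
  | p0 :: rest => plainB p0 ++ procB rest
  | [] => []

theorem splitOn_cons' (x : Char) (xs : List Char) :
    (x :: xs).splitOn '\\' =
      if x = '\\' then [] :: xs.splitOn '\\'
      else (xs.splitOn '\\').modifyHead (List.cons x) := by
  simp [List.splitOn, List.splitOnP_cons, beq_iff_eq]

theorem splitOn_ne_nil' (xs : List Char) : xs.splitOn '\\' ≠ [] :=
  List.splitOnP_ne_nil _ xs

-- The split-and-render pipeline computes exactly what A's scanning loop computes.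
theorem keyB : ∀ (l : List Char), fB l = stripAuxA l
  | [] => by simp [fB, stripAuxA, plainB, procB]
  | [c] => by
    by_cases hb : c = '\\'
    · simp [fB, splitOn_cons', hb, stripAuxA, plainB, procB]
    · by_cases hs : c = '`' ∨ c = '*' ∨ c = '_' ∨ c = '~'
      · rcases hs with h|h|h|h <;>
          simp [fB, splitOn_cons', h, stripAuxA, plainB, procB]
      · push_neg at hs
        obtain ⟨h1,h2,h3,h4⟩ := hs
        simp [fB, splitOn_cons', stripAuxA, plainB, procB, h1, h2, h3, h4,
          fun h => hb h]
  | c :: d :: rest => by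
    by_cases hb : c = '\\'
    · by_cases hd : d = '\\'
      · -- escaped backslash: segment after the first is empty
        have ih := keyB rest
        obtain ⟨q, r', hq⟩ := List.exists_cons_of_ne_nil (splitOn_ne_nil' rest)
        simp only [fB, splitOn_cons', hb, hd, hq] at ih ⊢
        simp only [stripAuxA, if_pos hb]
        simp [procB, plainB, ← ih]
      · have ih := keyB rest
        obtain ⟨q, r', hq⟩ := List.exists_cons_of_ne_nil (splitOn_ne_nil' rest)
        simp only [fB, splitOn_cons', hb, hd, hq] at ih ⊢
        simp only [stripAuxA]
        simp [procB, plainB, ← ih, List.modifyHead, hb]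
    · have ih := keyB (d :: rest)
      obtain ⟨q, r', hq⟩ := List.exists_cons_of_ne_nil (splitOn_ne_nil' (d :: rest))
      by_cases hs : c = '`' ∨ c = '*' ∨ c = '_' ∨ c = '~'
      · simp only [fB, splitOn_cons', if_neg hb, hq, List.modifyHead] at ih ⊢
        simp only [stripAuxA, if_neg hb, if_pos hs]
        rw [← ih]
        rcases hs with h|h|h|h <;> simp [plainB, h]
      · simp only [fB, splitOn_cons', if_neg hb, hq, List.modifyHead] at ih ⊢
        simp only [stripAuxA, if_neg hb, if_neg hs]
        rw [← ih]
        push_neg at hs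
        obtain ⟨h1,h2,h3,h4⟩ := hs
        simp [plainB, h1, h2, h3, h4]

-- ===== VERDICT =====
theorem strip_markdown_formatting_spec : Claim_equal_strip_markdown_formatting := by
  intro text _
  unfold Spec_strip_markdown_formatting strip_markdown_formatting strip_markdown_formatting_alt
  have h := keyB text.toList
  unfold fB at h
  obtain ⟨p0, rest, hp⟩ := List.exists_cons_of_ne_nil (splitOn_ne_nil' text.toList)
  rw [hp] at h ⊢
  dsimp only at h ⊢
  rw [h]
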